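-- pv_equiv track=rewrite | github.com/MTandHJ/leetcode | SS/Tencent_0822.py | func
-- ===== SOURCE A (Python) =====
-- def func(n, speed):
--     if n == 1:
--         return n
--     speed.sort()
--     # 代表以这个车队开头的，车队人数
--
--     dp = [1] * n
--     for i in range(n):
--         if speed[-1] - speed[i] <= 10:
--             dp[i] = n - i
--             continue
--
--         for j in range(i+1, n):
--             if speed[j] - speed[i] <= 10:
--                 dp[i] += 1
--     return max(dp)
-- ===== SOURCE B (Python) =====
-- def func(n, speed):
--     if n == 1:
--         return n
--     speed.sort()
--     best = 0
--     for i in range(n):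
--         # first index k in [i, n) with speed[k] > speed[i] + 10 (binary search)
--         lo, hi = i, n
--         while lo < hi:
--             mid = (lo + hi) // 2
--             if speed[mid] <= speed[i] + 10:
--                 lo = mid + 1
--             else:
--                 hi = mid
--         best = max(best, lo - i)
--     return best
-- ===== Notes on version B (the rewrite author's own statement) =====
-- stated objective: faster
-- what changed: A's inner linear scan over j in (i,n) is replaced by a binary search per element on the sorted list, turning O(n^2) into O(n log n).
import Mathlib
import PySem

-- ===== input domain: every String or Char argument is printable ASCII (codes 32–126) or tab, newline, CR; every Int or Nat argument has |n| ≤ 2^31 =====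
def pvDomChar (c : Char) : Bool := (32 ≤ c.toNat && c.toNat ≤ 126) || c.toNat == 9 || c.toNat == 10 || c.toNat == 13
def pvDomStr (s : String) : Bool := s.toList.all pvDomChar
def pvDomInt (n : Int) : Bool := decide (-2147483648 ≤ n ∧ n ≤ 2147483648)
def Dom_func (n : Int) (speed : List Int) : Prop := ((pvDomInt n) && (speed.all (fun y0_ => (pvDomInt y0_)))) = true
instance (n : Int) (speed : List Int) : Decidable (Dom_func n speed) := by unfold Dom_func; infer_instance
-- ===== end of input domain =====

-- B replaces A's quadratic inner scan by a per-element binary search on the sorted list (O(n log n)).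
-- Note: both A and B sort `speed` in place (same side effect); the theorems are about the return value.

-- ===== PORT A =====
def func (n : Int) (speed : List Int) : Int :=
  if n = 1 then n
  else
    let s := PySem.List.sorted speed (fun x => x) false
    -- dp[i] assigned once per i, then max(dp)
    let dp := (PySem.List.pyRange 0 n 1).map (fun i =>
      if PySem.List.pyGetD s (-1) 0 - PySem.List.pyGetD s i 0 ≤ 10 then n - i
      else (PySem.List.pyRange (i + 1) n 1).foldl
        (fun acc j => if PySem.List.pyGetD s j 0 - PySem.List.pyGetD s i 0 ≤ 10 then acc + 1 else acc) 1)
    (PySem.List.max? dp (fun x => x)).getD 0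

-- ===== PORT B =====
-- the while-loop of Source B: first index in [lo, hi) whose value exceeds t (binary search)
def bsLoop (s : List Int) (t lo hi : Int) : Int :=
  if h : lo < hi then
    let mid := PySem.Int.floordiv (lo + hi) 2
    if PySem.List.pyGetD s mid 0 ≤ t then bsLoop s t (mid + 1) hi
    else bsLoop s t lo mid
  else lo
termination_by (hi - lo).toNat
decreasing_by
  · have := PySem.Int.floordiv_two_mid_bounds (le_of_lt h)
    omega
  · have h2 : PySem.Int.floordiv (lo + hi) 2 < hi :=
      (PySem.Int.floordiv_lt_iff_lt_mul (by omega)).2 (by omega)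
    omega

def func_alt (n : Int) (speed : List Int) : Int :=
  if n = 1 then n
  else
    let s := PySem.List.sorted speed (fun x => x) false
    (PySem.List.pyRange 0 n 1).foldl (fun best i =>
      let lo := bsLoop s (PySem.List.pyGetD s i 0 + 10) i n
      max best (lo - i)) 0

-- ===== PRECONDITION & SPEC =====
-- Pre_ excludes exactly the inputs where A raises: n ≤ 0 (max of the empty dp, ValueError) and
-- n > len(speed) with n ≠ 1 (indexing past the list, IndexError).
def Pre_func (n : Int) (speed : List Int) : Prop := 1 ≤ n ∧ (n = 1 ∨ n ≤ (speed.length : Int))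
instance (n : Int) (speed : List Int) : Decidable (Pre_func n speed) := by unfold Pre_func; infer_instance
def pvWitness_func : Int × List Int := (3, [3, 15, 7])

def Spec_func (n : Int) (speed : List Int) (out : Int) : Prop := out = func_alt n speed
instance (n : Int) (speed : List Int) (out : Int) : Decidable (Spec_func n speed out) := by unfold Spec_func; infer_instance

-- ===== CLAIM (what is proved, stated in full; the proofs are below) =====
def Claim_equal_func : Prop := ∀ (n : Int) (speed : List Int), Dom_func n speed → Pre_func n speed → Spec_func n speed (func n speed)

-- ===== LEMMAS AND PROOFS =====

-- sorted access is monotone in the index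
theorem pv_g_mono (s : List Int) (hs : s.Pairwise (· ≤ ·)) {a b : Int}
    (ha : 0 ≤ a) (hab : a ≤ b) (hb : b < (s.length : Int)) :
    PySem.List.pyGetD s a 0 ≤ PySem.List.pyGetD s b 0 := by
  rcases eq_or_lt_of_le hab with rfl | hlt
  · exact le_refl _
  · rw [PySem.List.pyGetD_eq_getElem s 0 ha (by omega),
        PySem.List.pyGetD_eq_getElem s 0 (by omega) hb]
    exact List.pairwise_iff_getElem.1 hs a.toNat b.toNat (by omega) (by omega) (by omega)

-- binary-search invariant: bsLoop returns the split point of the predicate (· ≤ t) on [i, N)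
theorem pv_bs_inv (s : List Int) (hs : s.Pairwise (· ≤ ·)) (t i N : Int)
    (hi0 : 0 ≤ i) (hN : N ≤ (s.length : Int)) :
    ∀ (fuel : Nat) (lo hi : Int), (hi - lo).toNat ≤ fuel →
    i ≤ lo → lo ≤ hi → hi ≤ N →
    (∀ k, i ≤ k → k < lo → PySem.List.pyGetD s k 0 ≤ t) →
    (∀ k, hi ≤ k → k < N → ¬ PySem.List.pyGetD s k 0 ≤ t) →
    i ≤ bsLoop s t lo hi ∧ bsLoop s t lo hi ≤ N ∧
    (∀ k, i ≤ k → k < bsLoop s t lo hi → PySem.List.pyGetD s k 0 ≤ t) ∧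
    (∀ k, bsLoop s t lo hi ≤ k → k < N → ¬ PySem.List.pyGetD s k 0 ≤ t) := by
  intro fuel
  induction fuel with
  | zero =>
    intro lo hi hf h1 h2 h3 h4 h5
    have hlh : hi ≤ lo := by omega
    rw [bsLoop, dif_neg (by omega)]
    exact ⟨h1, by omega, fun k hk1 hk2 => h4 k hk1 hk2,
           fun k hk1 hk2 => h5 k (by omega) hk2⟩
  | succ m ih =>
    intro lo hi hf h1 h2 h3 h4 h5
    by_cases hlt : lo < hi
    · rw [bsLoop, dif_pos hlt]
      have hmid1 := (PySem.Int.floordiv_two_mid_bounds (le_of_lt hlt)).1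
      have hmid2 : PySem.Int.floordiv (lo + hi) 2 < hi :=
        (PySem.Int.floordiv_lt_iff_lt_mul (by omega)).2 (by omega)
      set mid := PySem.Int.floordiv (lo + hi) 2 with hmid
      by_cases hP : PySem.List.pyGetD s mid 0 ≤ t
      · rw [if_pos hP]
        exact ih (mid + 1) hi (by omega) (by omega) (by omega) h3
          (fun k hk1 hk2 => by
            by_cases hklo : k < lo
            · exact h4 k hk1 hklo
            · exact le_trans (pv_g_mono s hs (by omega) (by omega) (by omega)) hP)
          h5
      · rw [if_neg hP]
        exact ih lo mid (by omega) h1 (by omega) (by omega) h4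
          (fun k hk1 hk2 => by
            by_cases hkhi : hi ≤ k
            · exact h5 k hkhi hk2
            · intro hk
              exact hP (le_trans (pv_g_mono s hs (by omega) hk1 (by omega)) hk))
    · rw [bsLoop, dif_neg hlt]
      exact ⟨h1, by omega, fun k hk1 hk2 => h4 k hk1 hk2,
             fun k hk1 hk2 => h5 k (by omega) hk2⟩

-- counting a predicate that is true exactly on [a, r) within [a, b)
theorem pv_foldl_count_split (P : Int → Prop) [DecidablePred P] :
    ∀ (fuel : Nat) (a b r c : Int), (b - a).toNat ≤ fuel → a ≤ r → r ≤ b →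
    (∀ k, a ≤ k → k < r → P k) → (∀ k, r ≤ k → k < b → ¬ P k) →
    (PySem.List.pyRange a b 1).foldl (fun acc j => if P j then acc + 1 else acc) c = c + (r - a) := by
  intro fuel
  induction fuel with
  | zero =>
    intro a b r c hf h1 h2 _ _
    rw [PySem.List.pyRange_one_eq_nil (by omega)]
    simp; omega
  | succ m ih =>
    intro a b r c hf h1 h2 hT hF
    by_cases hab : a < b
    · rw [PySem.List.pyRange_one_cons hab]
      simp only [List.foldl_cons]
      by_cases har : a < r
      · rw [if_pos (hT a (le_refl a) har)]
        rw [ih (a + 1) b r (c + 1) (by omega) (by omega) h2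
            (fun k hk1 hk2 => hT k (by omega) hk2) hF]
        omega
      · rw [if_neg (hF a (by omega) hab)]
        rw [ih (a + 1) b (a + 1) c (by omega) (by omega) (by omega)
            (fun k hk1 hk2 => absurd hk2 (by omega))
            (fun k hk1 hk2 => hF k (by omega) hk2)]
        omega
    · rw [PySem.List.pyRange_one_eq_nil (by omega)]
      simp; omega

-- main equivalence on sorted data
theorem pv_main (n : Int) (speed : List Int) (_h1 : 1 ≤ n)
    (h2' : n = 1 ∨ n ≤ (speed.length : Int)) : func n speed = func_alt n speed := by
  by_cases hn1 : n = 1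
  · simp [func, func_alt, hn1]
  · have h2 : n ≤ (speed.length : Int) := h2'.resolve_left hn1
    unfold func func_alt
    rw [if_neg hn1, if_neg hn1]
    set s := PySem.List.sorted speed (fun x => x) false with hsdef
    have hs : s.Pairwise (· ≤ ·) := PySem.List.sorted_pairwise speed (fun x => x)
    have hlen : (s.length : Int) = (speed.length : Int) := by
      rw [hsdef, PySem.List.length_sorted]
    have hne : s ≠ [] := by
      intro h; rw [h] at hlen; simp at hlen; omega
    -- the binary-search result for index i
    have hr : ∀ i : Int, 0 ≤ i → i < n →
        i + 1 ≤ bsLoop s (PySem.List.pyGetD s i 0 + 10) i n ∧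
        bsLoop s (PySem.List.pyGetD s i 0 + 10) i n ≤ n ∧
        (∀ k, i ≤ k → k < bsLoop s (PySem.List.pyGetD s i 0 + 10) i n →
          PySem.List.pyGetD s k 0 ≤ PySem.List.pyGetD s i 0 + 10) ∧
        (∀ k, bsLoop s (PySem.List.pyGetD s i 0 + 10) i n ≤ k → k < n →
          ¬ PySem.List.pyGetD s k 0 ≤ PySem.List.pyGetD s i 0 + 10) := by
      intro i hi0 hin
      obtain ⟨a, b, c, d⟩ := pv_bs_inv s hs (PySem.List.pyGetD s i 0 + 10) i n hi0 (by omega)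
        (n - i).toNat i n (by omega) (le_refl i) (by omega) (le_refl n)
        (fun k hk1 hk2 => absurd hk2 (by omega))
        (fun k hk1 hk2 => absurd hk1 (by omega))
      refine ⟨?_, b, c, d⟩
      by_cases hri : bsLoop s (PySem.List.pyGetD s i 0 + 10) i n ≤ i
      · exact absurd (le_refl (PySem.List.pyGetD s i 0)) (by
          have := d i hri hin; intro h; exact this (by omega))
      · omega
    -- dp[i] = bs-result - i
    have hdp : ∀ i : Int, 0 ≤ i → i < n →
        (if PySem.List.pyGetD s (-1) 0 - PySem.List.pyGetD s i 0 ≤ 10 then n - i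
         else (PySem.List.pyRange (i + 1) n 1).foldl
           (fun acc j => if PySem.List.pyGetD s j 0 - PySem.List.pyGetD s i 0 ≤ 10 then acc + 1 else acc) 1)
        = bsLoop s (PySem.List.pyGetD s i 0 + 10) i n - i := by
      intro i hi0 hin
      obtain ⟨hra, hrb, hrc, hrd⟩ := hr i hi0 hin
      set r := bsLoop s (PySem.List.pyGetD s i 0 + 10) i n with hrdef
      by_cases hsc : PySem.List.pyGetD s (-1) 0 - PySem.List.pyGetD s i 0 ≤ 10
      · rw [if_pos hsc]
        -- last element within 10 ⇒ every element within 10 ⇒ r = n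
        have hlast : PySem.List.pyGetD s (-1) 0 = PySem.List.pyGetD s ((s.length : Int) - 1) 0 := by
          rw [PySem.List.pyGetD_neg_one s 0 hne,
              PySem.List.pyGetD_eq_getElem s 0 (by omega) (by omega)]
          rw [List.getLast_eq_getElem]
          congr 1
          omega
        have hrn : r = n := by
          by_contra hne'
          have hrln : r < n := by omega
          refine hrd r (le_refl r) hrln ?_
          calc PySem.List.pyGetD s r 0 ≤ PySem.List.pyGetD s ((s.length : Int) - 1) 0 :=
                pv_g_mono s hs (by omega) (by omega) (by omega)
            _ ≤ PySem.List.pyGetD s i 0 + 10 := by rw [← hlast]; omega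
        omega
      · rw [if_neg hsc]
        rw [pv_foldl_count_split (fun j => PySem.List.pyGetD s j 0 - PySem.List.pyGetD s i 0 ≤ 10)
            (n - (i + 1)).toNat (i + 1) n r 1 (by omega) (by omega) hrb
            (fun k hk1 hk2 => by have := hrc k (by omega) hk2; omega)
            (fun k hk1 hk2 => by have := hrd k hk1 hk2; omega)]
        omega
    -- fold both sides into the same running max
    have hn2 : 2 ≤ n := by omega
    have hcons : PySem.List.pyRange 0 n 1 = 0 :: PySem.List.pyRange 1 n 1 :=
      PySem.List.pyRange_one_cons (by omega)
    rw [hcons]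
    simp only [List.map_cons, List.foldl_cons, PySem.List.max?_id_cons, Option.getD_some,
               List.foldl_map]
    rw [hdp 0 (le_refl 0) (by omega)]
    have hmax0 : max 0 (bsLoop s (PySem.List.pyGetD s 0 0 + 10) 0 n - 0) =
        bsLoop s (PySem.List.pyGetD s 0 0 + 10) 0 n - 0 := by
      have := (hr 0 (le_refl 0) (by omega)).1
      omega
    rw [hmax0]
    -- now both are foldl max over pyRange 1 n with pointwise-equal step functions
    refine PySem.List.foldl_congr_mem _ _ _ _ ?_
    intro acc i hi
    have hi' := PySem.List.mem_pyRange_one.1 hi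
    rw [hdp i (by omega) (by omega)]

-- ===== VERDICT (by name: the statement is the Claim_ definition above) =====
theorem func_spec : Claim_equal_func := by
  intro n speed _ hpre
  unfold Spec_func
  exact pv_main n speed hpre.1 hpre.2
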